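-- pv_equiv track=rewrite | github.com/jwizenfeld04/Echo-Guard | echo_guard/ast_distance.py | _key_roots
-- ===== SOURCE A (Python) =====
-- def _key_roots(lld: list[int], size: int) -> list[int]:
--     """Compute key roots for Zhang-Shasha algorithm."""
--     visited: set[int] = set()
--     kr: list[int] = []
--     for i in range(size - 1, -1, -1):
--         if lld[i] not in visited:
--             kr.append(i)
--             visited.add(lld[i])
--     kr.sort()
--     return kr
-- ===== SOURCE B (Python) =====
-- def _key_roots(lld: list[int], size: int) -> list[int]:
--     """Compute key roots for Zhang-Shasha algorithm.
--
--     An index i < size is a key root iff its l-value does not occur again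
--     at any later index j < size, so test each i against the tail slice;
--     the result comes out already in increasing order, no sort needed.
--     """
--     return [i for i in range(size) if lld[i] not in lld[i + 1:size]]
-- ===== Notes on version B (the rewrite author's own statement) =====
-- stated objective: alternative
-- what changed: Replaces the backward scan with a visited-set plus a final sort by a direct quadratic test: keep each index i whose value does not reappear in the tail slice lld[i+1:size]; no auxiliary set, no sort, the result is built in increasing order.
import Mathlib
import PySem

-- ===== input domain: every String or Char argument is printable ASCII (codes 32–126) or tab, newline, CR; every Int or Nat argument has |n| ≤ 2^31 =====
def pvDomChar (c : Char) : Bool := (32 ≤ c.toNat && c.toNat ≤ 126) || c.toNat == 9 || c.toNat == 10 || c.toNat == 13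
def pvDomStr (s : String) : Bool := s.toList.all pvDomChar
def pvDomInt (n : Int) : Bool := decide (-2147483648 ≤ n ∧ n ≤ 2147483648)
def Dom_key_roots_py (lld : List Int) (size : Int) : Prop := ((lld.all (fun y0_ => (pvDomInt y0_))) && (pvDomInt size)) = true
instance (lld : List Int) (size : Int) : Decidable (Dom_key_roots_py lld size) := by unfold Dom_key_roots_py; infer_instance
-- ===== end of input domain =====

-- B drops A's visited-set/backward-scan/sort: it keeps each index i whose value does not
-- reappear in the tail slice lld[i+1:size], emitting the result already in increasing order
-- (alternative algorithm: direct quadratic test instead of set-guarded scan plus sort).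


-- ===== PORT A =====
-- 'lld[i]' is ported as PySem.List.pyGetD lld i 0, total under Pre_ (every visited index is in range there)
def key_roots_py (lld : List Int) (size : Int) : List Int :=
  let st :=
    (PySem.List.pyRange (size - 1) (-1) (-1)).foldl
      (fun (st : PySem.Set Int × List Int) i =>
        if PySem.Set.contains st.1 (PySem.List.pyGetD lld i 0) then st
        else (PySem.Set.add st.1 (PySem.List.pyGetD lld i 0), st.2 ++ [i]))
      (PySem.Set.empty, [])
  PySem.List.sorted st.2 (fun x => x) false

-- ===== PORT B =====
-- [i for i in range(size) if lld[i] not in lld[i+1:size]]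
def key_roots_py_alt (lld : List Int) (size : Int) : List Int :=
  (PySem.List.pyRange 0 size 1).filter
    (fun i => !((PySem.List.slice lld (some (i + 1)) (some size)).contains
                  (PySem.List.pyGetD lld i 0)))

-- ===== PRECONDITION & SPEC =====
-- Pre_ excludes exactly the inputs where the Python raises IndexError (both A and B index lld
-- at every i in range(size), so size must not exceed len(lld)); negative size is fine (empty loop).
def Pre_key_roots_py (lld : List Int) (size : Int) : Prop := size ≤ (lld.length : Int)
instance (lld : List Int) (size : Int) : Decidable (Pre_key_roots_py lld size) := by unfold Pre_key_roots_py; infer_instance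
def pvWitness_key_roots_py : List Int × Int := ([1, 0, 1], 3)

def Spec_key_roots_py (lld : List Int) (size : Int) (out : List Int) : Prop := out = key_roots_py_alt lld size
instance (lld : List Int) (size : Int) (out : List Int) : Decidable (Spec_key_roots_py lld size out) := by unfold Spec_key_roots_py; infer_instance

-- ===== CLAIM (what is proved, stated in full; the proofs are below) =====
def Claim_equal_key_roots_py : Prop := ∀ (lld : List Int) (size : Int), Dom_key_roots_py lld size → Pre_key_roots_py lld size → Spec_key_roots_py lld size (key_roots_py lld size)

-- ===== LEMMAS AND PROOFS =====

-- The list A's loop accumulates: keep i when f i is new, scanning P in order.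
def dkStep (f : Int → Int) (a : List Int) (i : Int) : List Int :=
  if f i ∈ a.map f then a else a ++ [i]

def dk (f : Int → Int) (P : List Int) : List Int := P.foldl (dkStep f) []

theorem dk_append (f : Int → Int) (P : List Int) (x : Int) :
    dk f (P ++ [x]) = dkStep f (dk f P) x := by
  simp [dk, List.foldl_append]

theorem mem_map_dk (f : Int → Int) (P : List Int) (v : Int) :
    v ∈ (dk f P).map f ↔ v ∈ P.map f := by
  induction P using List.reverseRecOn with
  | nil => simp [dk]
  | append_singleton P x ih =>
    rw [dk_append, dkStep]
    by_cases hx : f x ∈ (dk f P).map f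
    · rw [if_pos hx]
      simp only [List.map_append, List.mem_append, List.map_cons, List.map_nil,
        List.mem_singleton]
      constructor
      · intro h; exact Or.inl (ih.mp h)
      · rintro (h | h)
        · exact ih.mpr h
        · subst h; exact hx
    · rw [if_neg hx]
      simp only [List.map_append, List.mem_append, List.map_cons, List.map_nil,
        List.mem_singleton]
      exact or_congr ih Iff.rfl

theorem nodup_map_dk (f : Int → Int) (P : List Int) : ((dk f P).map f).Nodup := by
  induction P using List.reverseRecOn with
  | nil => simp [dk]
  | append_singleton P x ih =>
    rw [dk_append, dkStep]
    by_cases hx : f x ∈ (dk f P).map f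
    · rw [if_pos hx]; exact ih
    · rw [if_neg hx]
      simp only [List.map_append, List.map_cons, List.map_nil]
      exact List.Nodup.append ih (List.nodup_singleton _)
        (by intro a ha hb; simp at hb; subst hb; exact hx ha)

theorem nodup_dk (f : Int → Int) (P : List Int) : (dk f P).Nodup :=
  List.Nodup.of_map f (nodup_map_dk f P)

theorem mem_dk (f : Int → Int) (P : List Int) (i : Int) :
    i ∈ dk f P ↔ P.find? (fun j => f j == f i) = some i := by
  induction P using List.reverseRecOn with
  | nil => simp [dk]
  | append_singleton P x ih =>
    rw [dk_append, dkStep, List.find?_append]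
    by_cases hx : f x ∈ (dk f P).map f
    · rw [if_pos hx]
      rw [mem_map_dk f P] at hx
      rw [ih]
      cases hfind : List.find? (fun j => f j == f i) P with
      | some j => simp
      | none =>
        simp only [Option.none_or]
        rw [List.find?_eq_none] at hfind
        constructor
        · intro h; exact absurd h (by simp)
        · intro h
          simp only [List.find?_cons] at h
          split at h
          · rename_i hbeq
            have hfx : f x = f i := by simpa using hbeq
            obtain ⟨j, hj, hfj⟩ := List.mem_map.mp hx
            exact absurd (show f j = f i by rw [hfj, hfx]) (by simpa using hfind j hj)
          · simp at h
    · rw [if_neg hx]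
      rw [mem_map_dk f P] at hx
      simp only [List.mem_append, List.mem_singleton]
      cases hfind : List.find? (fun j => f j == f i) P with
      | some j =>
        simp only [Option.some_or]
        constructor
        · rintro (h | h)
          · rw [ih, hfind] at h; exact h
          · exfalso
            have hji : f j = f i := by simpa using List.find?_some hfind
            have hjP : j ∈ P := List.mem_of_find?_eq_some hfind
            rw [h] at hji
            exact hx (List.mem_map.mpr ⟨j, hjP, hji⟩)
        · intro h
          have hji2 : j = i := by simpa using h
          exact Or.inl (ih.mpr (by rw [hfind, hji2]))
      | none =>
        simp only [Option.none_or]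
        by_cases hfi : f x = f i
        · have hfx : List.find? (fun j => f j == f i) [x] = some x := by
            simp [hfi]
          rw [hfx]
          constructor
          · rintro (h | h)
            · rw [ih, hfind] at h; exact absurd h (by simp)
            · rw [h]
          · intro h
            have hxi : x = i := by simpa using h
            exact Or.inr hxi.symm
        · have hfx : List.find? (fun j => f j == f i) [x] = none := by
            simp [hfi]
          rw [hfx]
          constructor
          · rintro (h | h)
            · rw [ih, hfind] at h; exact absurd h (by simp)
            · exact absurd (by rw [h] : f x = f i) hfi
          · intro h; exact absurd h (by simp)

theorem foldA_eq (f : Int → Int) (P : List Int) (s : PySem.Set Int) (a : List Int)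
    (h : ∀ v, s.contains v = true ↔ v ∈ a.map f) :
    (P.foldl
      (fun (st : PySem.Set Int × List Int) i =>
        if PySem.Set.contains st.1 (f i) then st
        else (PySem.Set.add st.1 (f i), st.2 ++ [i])) (s, a)).2
    = P.foldl (dkStep f) a := by
  induction P generalizing s a with
  | nil => simp
  | cons i P ih =>
    simp only [List.foldl_cons]
    by_cases hc : s.contains (f i) = true
    · rw [if_pos hc, dkStep, if_pos ((h (f i)).mp hc)]
      exact ih s a h
    · rw [if_neg hc, dkStep, if_neg (fun hm => hc ((h (f i)).mpr hm))]
      refine ih _ _ ?_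
      intro v
      rw [PySem.Set.contains_iff, PySem.Set.mem_add]
      simp only [List.map_append, List.mem_append, List.map_cons, List.map_nil,
        List.mem_singleton]
      rw [← PySem.Set.contains_iff, h v]

-- find? over the countdown range finds i itself iff no larger index below b matches.
theorem find_cd (f : Int → Int) (i : Int) (h0 : 0 ≤ i) :
    ∀ (n : Nat) (b : Int), b = i + 1 + n →
      ((PySem.List.pyRange (b - 1) (-1) (-1)).find? (fun j => f j == f i) = some i
        ↔ ∀ j, i < j → j < b → f j ≠ f i) := by
  intro n
  induction n with
  | zero =>
    intro b hb
    have hb1 : b - 1 = i := by omega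
    rw [hb1, PySem.List.pyRange_neg_one_cons (by omega : (-1 : Int) < i),
      List.find?_cons_of_pos (by simp)]
    constructor
    · intro _ j h1 h2; omega
    · intro _; rfl
  | succ n ih =>
    intro b hb
    rw [PySem.List.pyRange_neg_one_cons (by omega : (-1 : Int) < b - 1)]
    by_cases hf : f (b - 1) = f i
    · rw [List.find?_cons_of_pos (by simpa using hf)]
      constructor
      · intro h
        exfalso
        have : b - 1 = i := by simpa using h
        omega
      · intro h
        exact absurd hf (h (b - 1) (by omega) (by omega))
    · rw [List.find?_cons_of_neg (by simpa using hf)]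
      rw [show b - 1 - 1 = (b - 1) - 1 from rfl, ih (b - 1) (by omega)]
      constructor
      · intro h j h1 h2
        rcases eq_or_lt_of_le (show j ≤ b - 1 by omega) with hj | hj
        · rw [hj]; exact hf
        · exact h j h1 (by omega)
      · intro h j h1 h2
        exact h j h1 (by omega)

-- membership in the slice lld[i+1:size] is exactly "the value recurs at a later index < size"
theorem mem_slice_iff (lld : List Int) (size i : Int) (h0 : 0 ≤ i) (hi : i < size)
    (hs : size ≤ (lld.length : Int)) (x : Int) :
    x ∈ PySem.List.slice lld (some (i + 1)) (some size)
      ↔ ∃ j, i < j ∧ j < size ∧ PySem.List.pyGetD lld j 0 = x := by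
  rw [PySem.List.slice_toNat lld (a := i + 1) (b := size) (by omega) (by omega)]
  have ha : (i + 1).toNat = i.toNat + 1 := by omega
  constructor
  · intro hx
    obtain ⟨k, hk, hke⟩ := List.mem_iff_getElem.mp hx
    have hlen : ((lld.drop (i + 1).toNat).take (size.toNat - (i + 1).toNat)).length
        = size.toNat - (i + 1).toNat := by
      simp [List.length_take, List.length_drop]; omega
    rw [hlen] at hk
    refine ⟨(((i + 1).toNat + k : Nat) : Int), by omega, by omega, ?_⟩
    rw [PySem.List.pyGetD_eq_getElem lld (i := (((i + 1).toNat + k : Nat) : Int)) 0 (by omega) (by push_cast; omega)]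
    have : ((lld.drop (i + 1).toNat).take (size.toNat - (i + 1).toNat))[k]
        = lld[(i + 1).toNat + k]'(by omega) := by
      rw [List.getElem_take, List.getElem_drop]
    rw [this] at hke
    have hidx : ((((i + 1).toNat + k : Nat)) : Int).toNat = (i + 1).toNat + k := by omega
    simp only [hidx]
    exact hke
  · rintro ⟨j, hij, hjs, hje⟩
    have hj0 : 0 ≤ j := by omega
    have hjlen : j < (lld.length : Int) := by omega
    rw [PySem.List.pyGetD_eq_getElem lld (i := j) 0 hj0 hjlen] at hje
    apply List.mem_iff_getElem.mpr
    have hlen : ((lld.drop (i + 1).toNat).take (size.toNat - (i + 1).toNat)).length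
        = size.toNat - (i + 1).toNat := by
      simp [List.length_take, List.length_drop]; omega
    refine ⟨j.toNat - (i + 1).toNat, by omega, ?_⟩
    have : ((lld.drop (i + 1).toNat).take (size.toNat - (i + 1).toNat))[j.toNat - (i + 1).toNat]'(by omega)
        = lld[(i + 1).toNat + (j.toNat - (i + 1).toNat)]'(by omega) := by
      rw [List.getElem_take, List.getElem_drop]
    rw [this, ← hje]
    congr 1
    omega

theorem key_roots_spec_aux (lld : List Int) (size : Int) (hs : size ≤ (lld.length : Int)) :
    key_roots_py lld size = key_roots_py_alt lld size := by
  unfold key_roots_py key_roots_py_alt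
  simp only
  set f : Int → Int := fun i => PySem.List.pyGetD lld i 0 with hf
  set p : Int → Bool :=
    fun i => !((PySem.List.slice lld (some (i + 1)) (some size)).contains
                 (PySem.List.pyGetD lld i 0)) with hp
  rw [foldA_eq f (PySem.List.pyRange (size - 1) (-1) (-1)) PySem.Set.empty []
      (by intro v; simp [PySem.Set.empty, PySem.Set.contains])]
  have hpw : ((PySem.List.pyRange 0 size 1).filter p).Pairwise (· < ·) :=
    (PySem.List.pairwise_lt_pyRange_one 0 size).filter p
  refine PySem.List.sorted_eq_of_perm_of_pairwise_lt _ _ _ ?_ hpw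
  -- the filtered range is a permutation of A's accumulated list
  have hnodB : ((PySem.List.pyRange 0 size 1).filter p).Nodup := hpw.imp ne_of_lt
  refine (List.perm_ext_iff_of_nodup hnodB (nodup_dk f _)).mpr ?_
  intro i
  rw [List.mem_filter, PySem.List.mem_pyRange_one,
    mem_dk f (PySem.List.pyRange (size - 1) (-1) (-1)) i]
  constructor
  · rintro ⟨⟨h0, hi⟩, hpi⟩
    rw [find_cd f i h0 (size - 1 - i).toNat size (by omega)]
    intro j h1 h2 hji
    have : f j ∈ PySem.List.slice lld (some (i + 1)) (some size) :=
      (mem_slice_iff lld size i h0 hi hs (f j)).mpr ⟨j, h1, h2, rfl⟩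
    rw [hji] at this
    simp only [hp, Bool.not_eq_true', List.contains_eq_mem, decide_eq_false_iff_not] at hpi
    exact hpi this
  · intro hfind
    have hiP : i ∈ PySem.List.pyRange (size - 1) (-1) (-1) :=
      List.mem_of_find?_eq_some hfind
    rw [PySem.List.mem_pyRange_neg_one] at hiP
    have h0 : 0 ≤ i := by omega
    have hi : i < size := by omega
    rw [find_cd f i h0 (size - 1 - i).toNat size (by omega)] at hfind
    refine ⟨⟨h0, hi⟩, ?_⟩
    simp only [hp, Bool.not_eq_true', List.contains_eq_mem, decide_eq_false_iff_not]
    intro hmem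
    obtain ⟨j, h1, h2, hje⟩ := (mem_slice_iff lld size i h0 hi hs _).mp hmem
    exact hfind j h1 h2 hje

-- ===== VERDICT (by name: the statement is the Claim_ definition above) =====
theorem key_roots_py_spec : Claim_equal_key_roots_py := by
  intro lld size _ hpre
  unfold Spec_key_roots_py
  exact key_roots_spec_aux lld size hpre
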